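-- pv_equiv track=rewrite | github.com/schang1146/adventofcode2020 | 06-custom_customs/Solution.py | get_unanimous_count
-- ===== SOURCE A (Python) =====
-- def get_unanimous_count(responses):
--     """Counts the number of characters that show up in every response of a group
--
--     Returns the count of unanimous answers
--
--     Time Complexity: O(n) where n is the total number of characters in the response group
--     Space Complexity: O(n)
--     """
--     seen = {}
--     for response in responses:
--         for char in response:
--             if char in seen:
--                 seen[char] += 1
--             else:
--                 seen[char] = 1
--
--     unanimous_count = 0
--     for char in seen.keys():
--         if seen[char] == len(responses):
--             unanimous_count += 1
--
--     return unanimous_count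
-- ===== SOURCE B (Python) =====
-- def get_unanimous_count(responses):
--     """Counts the characters whose total number of occurrences across all
--     responses equals the number of responses (sort + run-length scan)."""
--     pool = sorted(c for r in responses for c in r)
--     n = len(pool)
--     k = len(responses)
--     total = 0
--     i = 0
--     while i < n:
--         j = i + 1
--         while j < n and pool[j] == pool[i]:
--             j += 1
--         if j - i == k:
--             total += 1
--         i = j
--     return total
-- ===== Notes on version B (the rewrite author's own statement) =====
-- stated objective: alternative
-- what changed: Replaces A's hash-counter dictionary plus key scan by a sort-then-scan algorithm: flatten all characters, sort them, and make one run-length pass over the sorted sequence, tallying runs whose length equals len(responses).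
import Mathlib
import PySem

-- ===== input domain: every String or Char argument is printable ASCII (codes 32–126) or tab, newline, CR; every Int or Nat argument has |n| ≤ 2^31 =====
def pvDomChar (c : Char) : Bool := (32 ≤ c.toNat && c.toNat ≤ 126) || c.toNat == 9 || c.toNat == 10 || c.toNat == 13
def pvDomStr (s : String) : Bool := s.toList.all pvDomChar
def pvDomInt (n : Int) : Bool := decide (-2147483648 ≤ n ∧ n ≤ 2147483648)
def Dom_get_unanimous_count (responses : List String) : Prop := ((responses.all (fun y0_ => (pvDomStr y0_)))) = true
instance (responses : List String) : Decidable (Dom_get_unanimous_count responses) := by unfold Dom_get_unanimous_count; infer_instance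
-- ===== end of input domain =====

-- B replaces A's hash-counter dictionary and key scan by sort-then-scan: flatten,
-- sort, then one run-length pass tallying runs of length len(responses) (alternative, not faster).

-- ===== PORT A =====
def get_unanimous_count (responses : List String) : Int :=
  let seen : PySem.Dict Char Int :=
    responses.foldl (fun seen response =>
      response.toList.foldl (fun seen char =>
        if seen.contains char then seen.insert char (seen.getD char 0 + 1)
        else seen.insert char 1) seen) PySem.Dict.empty
  seen.keys.foldl (fun unanimous_count char =>
    if seen.getD char 0 = (responses.length : Int) then unanimous_count + 1
    else unanimous_count) 0

-- ===== PORT B =====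
-- run-length pass over the sorted pool: the inner `while pool[j] == pool[i]` loop is
-- the takeWhile of the run, `i = j` is the dropWhile; `total` is the accumulator.
def pvRunScan (k : Nat) : List Char → Int → Int
  | [], total => total
  | c :: rest, total =>
    let run := rest.takeWhile (fun x => x == c)
    pvRunScan k (rest.dropWhile (fun x => x == c))
      (if run.length + 1 = k then total + 1 else total)
termination_by l => l.length
decreasing_by
  exact Nat.lt_succ_of_le (List.length_dropWhile_le _ _)

def get_unanimous_count_alt (responses : List String) : Int :=
  let pool : List Char :=
    PySem.List.sorted (responses.flatMap (fun r => r.toList)) (fun x => x) false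
  pvRunScan responses.length pool 0

-- ===== PRECONDITION & SPEC =====
def Spec_get_unanimous_count (responses : List String) (out : Int) : Prop := out = get_unanimous_count_alt responses
instance (responses : List String) (out : Int) : Decidable (Spec_get_unanimous_count responses out) := by unfold Spec_get_unanimous_count; infer_instance

-- ===== CLAIM (what is proved, stated in full; the proofs are below) =====
def Claim_equal_get_unanimous_count : Prop := ∀ (responses : List String), Dom_get_unanimous_count responses → Spec_get_unanimous_count responses (get_unanimous_count responses)

-- ===== LEMMAS AND PROOFS =====

-- A's branching counting step is exactly the insert-getD-plus-one step.
theorem pv_step_eq (seen : PySem.Dict Char Int) (c : Char) :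
    (if seen.contains c then seen.insert c (seen.getD c 0 + 1) else seen.insert c 1)
      = seen.insert c (seen.getD c 0 + 1) := by
  by_cases h : seen.contains c = true
  · simp [h]
  · simp only [Bool.not_eq_true] at h
    rw [PySem.Dict.getD_of_not_contains (h := h)]; simp [h]

-- A's dictionary is Counter(pool) for the flattened character list.
theorem pv_seen_eq_counter (responses : List String) :
    responses.foldl (fun seen response =>
      response.toList.foldl (fun seen char =>
        if seen.contains char then seen.insert char (seen.getD char 0 + 1)
        else seen.insert char 1) seen) PySem.Dict.empty
    = PySem.Dict.counter (responses.flatMap (fun r => r.toList)) := by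
  have hf : (fun (seen : PySem.Dict Char Int) (char : Char) =>
      if seen.contains char then seen.insert char (seen.getD char 0 + 1)
      else seen.insert char 1)
      = fun seen char => seen.insert char (seen.getD char 0 + 1) := by
    funext seen char; exact pv_step_eq seen char
  rw [hf, ← List.foldl_flatMap, PySem.Dict.foldl_insert_getD_add_one_eq_counter]

-- a sorted list bounded below by c carries no c after dropWhile (== c)
theorem pv_not_mem_dropWhile (c : Char) : ∀ (r : List Char), r.Pairwise (· ≤ ·) →
    (∀ y ∈ r, c ≤ y) → c ∉ r.dropWhile (fun x => x == c)
  | [], _, _ => by simp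
  | a :: r', hp, hle => by
    by_cases ha : (a == c) = true
    · simp only [List.dropWhile_cons, if_pos ha]
      exact pv_not_mem_dropWhile c r' hp.of_cons (fun y hy => hle y (List.mem_cons_of_mem _ hy))
    · simp only [List.dropWhile_cons, if_neg ha]
      intro hc
      have hac : a ≠ c := by simpa using ha
      have hca : c < a := lt_of_le_of_ne (hle a List.mem_cons_self) (Ne.symm hac)
      rcases List.mem_cons.1 hc with rfl | hc'
      · exact hac rfl
      · exact absurd ((List.pairwise_cons.1 hp).1 c hc') (not_le.2 hca)

-- accumulator form of the run-length scan
theorem pvRunScan_acc (k : Nat) (l : List Char) (t : Int) :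
    pvRunScan k l t = t + pvRunScan k l 0 := by
  refine pvRunScan.induct k
    (motive := fun l _ => ∀ s : Int, pvRunScan k l s = s + pvRunScan k l 0)
    (fun total s => by simp [pvRunScan])
    (fun c rest total ih s => ?_) l 0 t
  simp only [pvRunScan]
  rw [ih, ih (if (List.takeWhile (fun x => x == c) rest).length + 1 = k then (0:Int) + 1 else 0)]
  split_ifs <;> ring

-- the run-length scan of a sorted list counts the distinct chars whose count is k
theorem pvRunScan_eq (k : Nat) (l : List Char) (hs : l.Pairwise (· ≤ ·)) :
    pvRunScan k l 0
      = ((PySem.Set.ofList l).countP (fun c => l.count c = k) : Int) := by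
  refine pvRunScan.induct k
    (motive := fun l _ => l.Pairwise (· ≤ ·) →
      pvRunScan k l 0 = ((PySem.Set.ofList l).countP (fun c => l.count c = k) : Int))
    (fun total _ => by simp [pvRunScan, PySem.Set.ofList])
    (fun c rest total ih hs => ?_) l 0 hs
  · have hrest : rest.Pairwise (· ≤ ·) := hs.of_cons
    have hle : ∀ x ∈ rest, c ≤ x := fun x hx => (List.pairwise_cons.1 hs).1 x hx
    set t := rest.takeWhile (fun x => x == c) with ht
    set d := rest.dropWhile (fun x => x == c) with hd
    have htd : t ++ d = rest := List.takeWhile_append_dropWhile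
    have hdp : d.Pairwise (· ≤ ·) :=
      List.Pairwise.sublist (List.dropWhile_sublist _) hrest
    have htc : ∀ x ∈ t, x = c := by
      intro x hx
      have := List.mem_takeWhile_imp hx
      simpa using this
    have hdc : ∀ x ∈ d, x ≠ c := by
      intro x hx hxc
      subst hxc
      exact pv_not_mem_dropWhile x rest hrest hle (hd ▸ hx)
    -- counts
    have hcount_c : (c :: rest).count c = t.length + 1 := by
      have h1 : t.count c = t.length :=
        List.count_eq_length.2 (fun b hb => ((htc b hb).symm ▸ rfl))
      have h2 : d.count c = 0 := List.count_eq_zero.2 (fun hc => hdc c hc rfl)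
      rw [List.count_cons_self, ← htd, List.count_append, h1, h2]
    have hcount_x : ∀ x ∈ d, (c :: rest).count x = d.count x := by
      intro x hx
      have hxc : x ≠ c := hdc x hx
      have h1 : t.count x = 0 :=
        List.count_eq_zero.2 (fun hc => hxc (htc x hc))
      rw [List.count_cons_of_ne (Ne.symm hxc), ← htd, List.count_append, h1, Nat.zero_add]
    -- sets
    have hmem : ∀ a : Char, a ∈ PySem.Set.ofList (c :: rest) ↔ a ∈ c :: PySem.Set.ofList d := by
      intro a
      rw [PySem.Set.mem_ofList]
      constructor
      · intro ha
        rcases List.mem_cons.1 ha with rfl | ha'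
        · exact List.mem_cons_self
        · rw [← htd] at ha'
          rcases List.mem_append.1 ha' with h | h
          · exact (htc a h) ▸ List.mem_cons_self
          · exact List.mem_cons.2 (Or.inr ((PySem.Set.mem_ofList d a).2 h))
      · intro ha
        rcases List.mem_cons.1 ha with rfl | ha'
        · exact List.mem_cons_self
        · have : a ∈ d := (PySem.Set.mem_ofList d a).1 ha'
          exact List.mem_cons.2 (Or.inr (htd ▸ List.mem_append.2 (Or.inr this)))
    have hnd1 : (PySem.Set.ofList (c :: rest)).Nodup := PySem.Set.nodup_ofList _
    have hnd2 : (c :: PySem.Set.ofList d).Nodup := by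
      refine List.nodup_cons.2 ⟨?_, PySem.Set.nodup_ofList _⟩
      intro hc
      exact hdc c ((PySem.Set.mem_ofList d c).1 hc) rfl
    have hperm : (PySem.Set.ofList (c :: rest)).Perm (c :: PySem.Set.ofList d) :=
      (List.perm_ext_iff_of_nodup hnd1 hnd2).2 hmem
    -- put it together
    simp only [pvRunScan]
    rw [← ht, ← hd, pvRunScan_acc, ih hdp]
    rw [hperm.countP_eq]
    rw [List.countP_cons]
    have hcongr : (PySem.Set.ofList d).countP (fun x => decide ((c :: rest).count x = k))
        = (PySem.Set.ofList d).countP (fun x => decide (d.count x = k)) := by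
      apply List.countP_congr
      intro x hx
      rw [hcount_x x ((PySem.Set.mem_ofList d x).1 hx)]
    rw [hcongr]
    have hiff : ((c :: rest).count c = k) ↔ (t.length + 1 = k) := by
      rw [hcount_c]
    by_cases hk : t.length + 1 = k
    · simp only [hk, if_pos, hiff.2 hk, decide_true]
      push_cast; ring
    · have : ¬ ((c :: rest).count c = k) := fun h => hk (hiff.1 h)
      simp only [hk, this, decide_false]
      push_cast; ring

-- Bool/Prop glue for A's counting fold
theorem pv_fold_count (pool : List Char) (n : Nat) :
    (PySem.Set.ofList pool).foldl
      (fun acc c => if ((pool.count c : Int)) = (n : Int) then acc + 1 else acc) (0 : Int)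
    = ((PySem.Set.ofList pool).countP (fun c => pool.count c = n) : Int) := by
  have h : (fun (acc : Int) (c : Char) =>
      if ((pool.count c : Int)) = (n : Int) then acc + 1 else acc)
      = fun acc c => if (fun c => decide (pool.count c = n)) c = true then acc + 1 else acc := by
    funext acc c
    by_cases hc : pool.count c = n
    · simp [hc]
    · have : ¬ ((pool.count c : Int) = (n : Int)) := by exact_mod_cast hc
      simp [hc, this]
  rw [h, PySem.List.foldl_count_if]
  simp

-- ===== VERDICT (by name: the statement is the Claim_ definition above) =====
theorem get_unanimous_count_spec : Claim_equal_get_unanimous_count := by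
  intro responses _
  unfold Spec_get_unanimous_count get_unanimous_count get_unanimous_count_alt
  simp only [pv_seen_eq_counter, PySem.Dict.keys_counter, PySem.Dict.getD_counter]
  set pool := responses.flatMap (fun r => r.toList) with hpool
  set spool := PySem.List.sorted pool (fun x => x) false with hsp
  have hperm : spool.Perm pool := PySem.List.sorted_perm pool (fun x => x) false
  have hsorted : spool.Pairwise (· ≤ ·) := by
    simpa using PySem.List.sorted_pairwise pool (fun x => x)
  rw [pv_fold_count, pvRunScan_eq _ _ hsorted]
  congr 1
  -- distinct elements and counts agree between pool and its sorted permutation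
  have hmem : ∀ a : Char, a ∈ PySem.Set.ofList pool ↔ a ∈ PySem.Set.ofList spool := by
    intro a
    rw [PySem.Set.mem_ofList, PySem.Set.mem_ofList, hperm.mem_iff]
  have hp : (PySem.Set.ofList pool).Perm (PySem.Set.ofList spool) :=
    (List.perm_ext_iff_of_nodup (PySem.Set.nodup_ofList _) (PySem.Set.nodup_ofList _)).2 hmem
  rw [hp.countP_eq]
  apply List.countP_congr
  intro x _
  rw [hperm.count_eq]
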